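-- pv_equiv track=rewrite | github.com/kobeomseok95/remind-algorithm | python/programmers/level1/86491.py | solution
-- ===== SOURCE A (Python) =====
-- def solution(sizes):
--     sizes = [sorted(size, reverse=True) for size in sizes]
--     answer = 0
--     max_y, max_x = 0, 0
--     for y, x in sizes:
--         max_y = max(max_y, y)
--         max_x = max(max_x, x)
--         answer = max_y * max_x
--     return answer
-- ===== SOURCE B (Python) =====
-- def solution(sizes):
--     # Divide-and-conquer: the bounding box of a group of cards is the
--     # componentwise max (merge) of its two halves' boxes; a leaf is one card
--     # oriented landscape.  (0, 0) is the neutral box: it is the answer for the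
--     # empty input and the seed merged in at the top.
--     def merge(p, q):
--         return (max(p[0], q[0]), max(p[1], q[1]))
--
--     def box(lo, hi):  # bounding box of sizes[lo:hi], hi > lo
--         if hi - lo == 1:
--             a, b = sizes[lo]
--             return (max(a, b), min(a, b))
--         mid = (lo + hi) // 2
--         return merge(box(lo, mid), box(mid, hi))
--
--     h, w = (0, 0) if not sizes else merge((0, 0), box(0, len(sizes)))
--     return h * w
-- ===== Notes on version B (the rewrite author's own statement) =====
-- stated objective: alternative
-- what changed: Replaces A's fused left-to-right loop (per-card sort plus three running accumulators) with a recursive divide-and-conquer over index ranges that merges the bounding boxes of the two halves componentwise and multiplies the final box's sides once.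
import Mathlib
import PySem

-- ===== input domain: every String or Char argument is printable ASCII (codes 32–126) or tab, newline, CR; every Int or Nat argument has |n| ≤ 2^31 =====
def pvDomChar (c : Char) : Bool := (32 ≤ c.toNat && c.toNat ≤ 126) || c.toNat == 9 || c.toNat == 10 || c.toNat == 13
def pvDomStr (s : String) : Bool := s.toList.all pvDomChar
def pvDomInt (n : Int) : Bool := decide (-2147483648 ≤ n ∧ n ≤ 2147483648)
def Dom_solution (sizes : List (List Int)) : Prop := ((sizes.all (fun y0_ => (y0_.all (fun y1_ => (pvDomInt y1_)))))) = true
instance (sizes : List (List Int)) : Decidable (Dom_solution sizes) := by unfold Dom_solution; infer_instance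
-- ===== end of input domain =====

-- B replaces A's fused loop (per-pair sort + three running accumulators) with a
-- divide-and-conquer over index ranges merging componentwise bounding boxes; objective: alternative.

-- ===== PORT A =====
-- loop body: 'for y, x in sizes: max_y = max(max_y, y); max_x = max(max_x, x); answer = max_y * max_x'
-- state = (answer, max_y, max_x); a non-pair element cannot occur under Pre_ (Python raises ValueError on unpack)
def solutionStep (st : Int × Int × Int) (s : List Int) : Int × Int × Int :=
  match s with
  | [y, x] => (max st.2.1 y * max st.2.2 x, max st.2.1 y, max st.2.2 x)
  | _ => st

def solution (sizes : List (List Int)) : Int :=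
  let sizes2 := sizes.map (fun size => PySem.List.sorted size (fun v => v) true)
  (sizes2.foldl solutionStep (0, 0, 0)).1

-- ===== PORT B =====
-- 'merge(p, q) = (max(p[0], q[0]), max(p[1], q[1]))'
def mergeBox (p q : Int × Int) : Int × Int := (max p.1 q.1, max p.2 q.2)

-- 'box(lo, hi)': bounding box of sizes[lo:hi]; the 'hi ≤ lo' guard only makes the
-- recursion total (Python never calls box on an empty range); the '_ => (0, 0)'
-- leaf default is unreachable under Pre_ (Python raises ValueError on unpack there)
def boxB (sizes : List (List Int)) (lo hi : Nat) : Int × Int :=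
  if hi ≤ lo then (0, 0)
  else if hi - lo = 1 then
    match sizes[lo]? with
    | some [a, b] => (max a b, min a b)
    | _ => (0, 0)
  else
    let mid := (lo + hi) / 2
    mergeBox (boxB sizes lo mid) (boxB sizes mid hi)
termination_by hi - lo
decreasing_by all_goals omega

def solution_alt (sizes : List (List Int)) : Int :=
  let hw := if sizes = [] then (0, 0) else mergeBox (0, 0) (boxB sizes 0 sizes.length)
  hw.1 * hw.2

-- ===== PRECONDITION & SPEC =====
-- Pre_ admits exactly the inputs on which A returns: Python A unpacks 'for y, x in …',
-- raising ValueError whenever an inner list does not have exactly 2 elements.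
def Pre_solution (sizes : List (List Int)) : Prop := ∀ s ∈ sizes, s.length = 2
instance (sizes : List (List Int)) : Decidable (Pre_solution sizes) := by unfold Pre_solution; infer_instance
def pvWitness_solution : List (List Int) := [[60, 50], [30, 70], [60, 30], [80, 40]]
def Spec_solution (sizes : List (List Int)) (out : Int) : Prop := out = solution_alt sizes
instance (sizes : List (List Int)) (out : Int) : Decidable (Spec_solution sizes out) := by unfold Spec_solution; infer_instance

-- ===== CLAIM (what is proved, stated in full; the proofs are below) =====
def Claim_equal_solution : Prop := ∀ (sizes : List (List Int)), Dom_solution sizes → Pre_solution sizes → Spec_solution sizes (solution sizes)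

-- ===== LEMMAS AND PROOFS =====

-- the leaf value of a card (proof-side abbreviation)
def leafBox (s : List Int) : Int × Int :=
  match s with
  | [a, b] => (max a b, min a b)
  | _ => (0, 0)

lemma mergeBox_assoc (p q r : Int × Int) :
    mergeBox (mergeBox p q) r = mergeBox p (mergeBox q r) := by
  simp [mergeBox, max_assoc]

-- merging any box z into boxB over [lo, hi) is folding the leaves of that segment onto z
lemma boxB_fold (sizes : List (List Int)) (n lo hi : Nat) (z : Int × Int)
    (hn : hi - lo ≤ n) (hlt : lo < hi) (hhi : hi ≤ sizes.length) :
    mergeBox z (boxB sizes lo hi)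
      = ((sizes.drop lo).take (hi - lo)).foldl (fun z s => mergeBox z (leafBox s)) z := by
  induction n generalizing lo hi z with
  | zero => omega
  | succ n ih =>
    rw [boxB]
    by_cases h1 : hi - lo = 1
    · have hget : sizes[lo]? = some sizes[lo] := by
        exact List.getElem?_eq_getElem (by omega)
      have hseg : (sizes.drop lo).take (hi - lo) = [sizes[lo]] := by
        rw [h1]
        rw [List.take_one]
        simp [List.head?_drop, hget, Option.toList]
      rw [if_neg (by omega), if_pos h1, hseg]
      simp only [List.foldl_cons, List.foldl_nil]
      cases hs : sizes[lo] with
      | nil => simp [hget, hs, leafBox]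
      | cons a t =>
        cases t with
        | nil => simp [hget, hs, leafBox]
        | cons b u =>
          cases u with
          | nil => simp [hget, hs, leafBox]
          | cons c v => simp [hget, hs, leafBox]
    · rw [if_neg (by omega), if_neg h1]
      have h2 : 2 ≤ hi - lo := by omega
      set mid := (lo + hi) / 2 with hmid
      have hm1 : lo < mid := by omega
      have hm2 : mid < hi := by omega
      rw [← mergeBox_assoc]
      rw [ih lo mid z (by omega) hm1 (by omega)]
      rw [ih mid hi _ (by omega) hm2 hhi]
      have hsplit : (sizes.drop lo).take (hi - lo)
          = (sizes.drop lo).take (mid - lo) ++ (sizes.drop mid).take (hi - mid) := by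
        have hdd : (sizes.drop lo).drop (mid - lo) = sizes.drop mid := by
          rw [List.drop_drop]
          congr 1
          omega
        rw [show hi - lo = (mid - lo) + (hi - mid) by omega, List.take_add, hdd]
      rw [hsplit, List.foldl_append]

-- a fold of mergeBox over leaves is the pair of folds of max over bigs and smalls
lemma fold_merge_split (l : List (List Int)) (z : Int × Int) :
    l.foldl (fun z s => mergeBox z (leafBox s)) z
      = ((l.map (fun s => (leafBox s).1)).foldl max z.1,
         (l.map (fun s => (leafBox s).2)).foldl max z.2) := by
  induction l generalizing z with
  | nil => simp
  | cons s t ih =>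
    simp only [List.foldl_cons, List.map_cons]
    rw [ih]
    simp [mergeBox]

lemma leafBox_pair (a b : Int) : leafBox [a, b] = (max a b, min a b) := rfl

-- per-card facts used on A's side (inner lists of length 2)
lemma sorted_pair (a b : Int) :
    PySem.List.sorted [a, b] (fun v => v) true = [max a b, min a b] := by
  simp only [PySem.List.sorted_rev_eq_foldl_insertBy, List.foldl, PySem.List.insertBy]
  split_ifs with h <;> simp only [decide_eq_true_eq, not_lt] at h
  · simp [max_eq_right h.le, min_eq_left h.le]
  · simp [max_eq_left h, min_eq_right h]

-- A's loop invariant: the fold computes the two running maxima and their product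
lemma loop_eq (l : List (List Int)) (hl : ∀ s ∈ l, s.length = 2) (a my mx : Int) :
    (l.map (fun size => PySem.List.sorted size (fun v => v) true)).foldl solutionStep (a, my, mx)
      = (if l = [] then a else
            (l.map (fun s => (leafBox s).1)).foldl max my *
            (l.map (fun s => (leafBox s).2)).foldl max mx,
         (l.map (fun s => (leafBox s).1)).foldl max my,
         (l.map (fun s => (leafBox s).2)).foldl max mx) := by
  induction l generalizing a my mx with
  | nil => simp
  | cons s t ih =>
    obtain ⟨x, y, rfl⟩ : ∃ x y, s = [x, y] := by
      have h2 := hl s (by simp)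
      match s with
      | [x, y] => exact ⟨x, y, rfl⟩
    have ht : ∀ u ∈ t, u.length = 2 := fun u hu => hl u (by simp [hu])
    simp only [List.map_cons, List.foldl_cons, sorted_pair, solutionStep, leafBox_pair]
    rw [ih ht]
    cases t with
    | nil => simp
    | cons u v => simp

-- ===== VERDICT (by name: the statement is the Claim_ definition above) =====
theorem solution_spec : Claim_equal_solution := by
  intro sizes _ hpre
  unfold Spec_solution solution solution_alt
  simp only []
  rw [loop_eq sizes hpre 0 0 0]
  cases sizes with
  | nil => simp
  | cons s t =>
    rw [if_neg (by simp)]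
    have hfold := boxB_fold (s :: t) (s :: t).length 0 (s :: t).length (0, 0)
      (by omega) (by simp) (le_refl _)
    simp only [List.drop_zero, Nat.sub_zero, List.take_length] at hfold
    simp only [if_neg (by simp : ¬ (s :: t) = [])]
    rw [hfold, fold_merge_split]
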